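-- pv_equiv track=rewrite | github.com/garymooney/qmuvi | qmuvi/__init__.py | note_map_c_major
-- ===== SOURCE A (Python) =====
-- def note_map_c_major(n):
--     C_MAJ = [0, 2, 4, 5, 7, 9, 11, 12, 14, 16, 17, 19, 21, 23, 24, 26, 28, 29, 31, 33, 35, 36, 38, 40, 41, 43, 45, 47, 48, 50, 52, 53, 55, 57, 59, 60, 62, 64, 65,
--              67, 69, 71, 72, 74, 76, 77, 79, 81, 83, 84, 86, 88, 89, 91, 93, 95, 96, 98, 100, 101, 103, 105, 107, 108, 110, 112, 113, 115, 117, 119, 120, 122, 124, 125, 127]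
--     CURR_MODE = C_MAJ
--     note = 60+n
--     # Shifting
--     if CURR_MODE and note < CURR_MODE[0]:
--         note = CURR_MODE[0]
--     else:
--         while (CURR_MODE and note not in CURR_MODE):
--             note -= 1
--     return note
-- ===== SOURCE B (Python) =====
-- _OFFSETS = [0, 1, 0, 1, 0, 0, 1, 0, 1, 0, 1, 0]
--
-- def note_map_c_major(n):
--     note = 60 + n
--     if note < 0:
--         return 0
--     if note > 127:
--         return 127
--     return note - _OFFSETS[note % 12]
-- ===== Notes on version B (the rewrite author's own statement) =====
-- stated objective: faster
-- what changed: Replaced the decrement-until-member loop over a 75-element list with an O(1) clamp to [0,127] plus a 12-entry pitch-class offset table indexed by note % 12.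
import Mathlib
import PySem

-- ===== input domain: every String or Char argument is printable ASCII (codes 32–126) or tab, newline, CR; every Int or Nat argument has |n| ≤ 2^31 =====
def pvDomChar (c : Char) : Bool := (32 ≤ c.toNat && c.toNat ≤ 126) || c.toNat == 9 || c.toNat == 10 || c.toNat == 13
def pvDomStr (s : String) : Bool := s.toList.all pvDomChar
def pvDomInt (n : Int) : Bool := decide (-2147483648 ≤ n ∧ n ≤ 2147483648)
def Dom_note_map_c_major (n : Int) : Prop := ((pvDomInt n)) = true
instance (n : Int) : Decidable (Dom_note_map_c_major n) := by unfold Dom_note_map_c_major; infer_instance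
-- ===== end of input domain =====

-- B replaces A's decrement-until-member loop with a clamp to [0,127] and a 12-entry
-- pitch-class offset table (O(1) instead of O(n)); return values are identical.

-- ===== PORT A =====
def pvCMaj : List Int :=
  [0, 2, 4, 5, 7, 9, 11, 12, 14, 16, 17, 19, 21, 23, 24, 26, 28, 29, 31, 33, 35, 36, 38, 40, 41, 43, 45, 47, 48, 50, 52, 53, 55, 57, 59, 60, 62, 64, 65,
   67, 69, 71, 72, 74, 76, 77, 79, 81, 83, 84, 86, 88, 89, 91, 93, 95, 96, 98, 100, 101, 103, 105, 107, 108, 110, 112, 113, 115, 117, 119, 120, 122, 124, 125, 127]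

-- the while loop; fuel is only a totality guard (note.toNat + 1 steps always suffice,
-- since 0 ∈ pvCMaj stops the descent)
def pvLoopA : Nat → Int → Int
  | 0, note => note
  | fuel + 1, note => if note ∈ pvCMaj then note else pvLoopA fuel (note - 1)

def note_map_c_major (n : Int) : Int :=
  let note := 60 + n
  if note < 0 then 0
  else pvLoopA (note.toNat + 1) note

-- ===== PORT B =====
def pvOffsets : List Int := [0, 1, 0, 1, 0, 0, 1, 0, 1, 0, 1, 0]

def note_map_c_major_alt (n : Int) : Int :=
  let note := 60 + n
  if note < 0 then 0
  else if note > 127 then 127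
  else note - pvOffsets.getD (PySem.Int.mod note 12).toNat 0

-- ===== PRECONDITION & SPEC =====
def Spec_note_map_c_major (n : Int) (out : Int) : Prop := out = note_map_c_major_alt n
instance (n : Int) (out : Int) : Decidable (Spec_note_map_c_major n out) := by unfold Spec_note_map_c_major; infer_instance

-- ===== CLAIM (what is proved, stated in full; the proofs are below) =====
def Claim_equal_note_map_c_major : Prop := ∀ (n : Int), Dom_note_map_c_major n → Spec_note_map_c_major n (note_map_c_major n)

-- ===== LEMMAS AND PROOFS =====
set_option maxHeartbeats 2000000 in
theorem pvLoopA_small : ∀ m : Nat, m < 128 →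
    pvLoopA (m + 1) (m : Int) = (m : Int) - pvOffsets.getD (PySem.Int.mod (m : Int) 12).toNat 0 := by
  decide

theorem pvCMaj_le (x : Int) (hx : x ∈ pvCMaj) : x ≤ 127 := by
  have h : ∀ y ∈ pvCMaj, y ≤ 127 := by decide
  exact h x hx

theorem pvLoopA_big : ∀ (k f : Nat), k ≤ f → pvLoopA (f + 1) (127 + (k : Int)) = 127 := by
  intro k
  induction k with
  | zero =>
      intro f _
      simp [pvLoopA, show (127 : Int) ∈ pvCMaj from by decide]
  | succ k ih =>
      intro f hf
      obtain ⟨f', rfl⟩ : ∃ f', f = f' + 1 := ⟨f - 1, by omega⟩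
      have hnm : (127 + ((k + 1 : Nat) : Int)) ∉ pvCMaj := by
        intro hmem
        have := pvCMaj_le _ hmem
        push_cast at this; omega
      have step : pvLoopA (f' + 1 + 1) (127 + ((k + 1 : Nat) : Int))
            = if (127 + ((k + 1 : Nat) : Int)) ∈ pvCMaj then (127 + ((k + 1 : Nat) : Int))
              else pvLoopA (f' + 1) (127 + ((k + 1 : Nat) : Int) - 1) := rfl
      rw [step, if_neg hnm]
      have harg : (127 + ((k + 1 : Nat) : Int) - 1) = 127 + (k : Int) := by push_cast; ring
      rw [harg]
      exact ih f' (by omega)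

-- ===== VERDICT (by name: the statement is the Claim_ definition above) =====
set_option maxRecDepth 4000 in
theorem note_map_c_major_spec : Claim_equal_note_map_c_major := by
  intro n _
  show note_map_c_major n = note_map_c_major_alt n
  simp only [note_map_c_major, note_map_c_major_alt]
  by_cases h1 : 60 + n < 0
  · rw [if_pos h1, if_pos h1]
  · rw [if_neg h1, if_neg h1]
    by_cases h2 : 60 + n > 127
    · rw [if_pos h2]
      obtain ⟨k, hk1, hk2⟩ : ∃ k : Nat, 60 + n = 127 + (k : Int) ∧ (60 + n).toNat + 1 = (k + 127) + 1 :=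
        ⟨(60 + n).toNat - 127, by omega, by omega⟩
      rw [hk2, hk1]
      exact pvLoopA_big k (k + 127) (by omega)
    · rw [if_neg h2]
      obtain ⟨m, hm1, hm2, hm3⟩ : ∃ m : Nat, 60 + n = (m : Int) ∧ (60 + n).toNat + 1 = m + 1 ∧ m < 128 :=
        ⟨(60 + n).toNat, by omega, by omega, by omega⟩
      rw [hm2, hm1]
      exact pvLoopA_small m hm3
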